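-- pv_equiv track=rewrite | github.com/kaust-cs249-2020/fernando-zhapa | chapter3/_331_pathToGenome.py | pathToGenome
-- ===== SOURCE A (Python) =====
-- def pathToGenome(path):
--     # Input: A sequence path of k-mers Pattern_1, … ,Pattern_n such that the last k - 1 symbols of Pattern_i are equal to the first k-1 symbols of Pattern_i+1 for 1 ≤ i ≤ n-1.
--     # Output: A string Text of length k+n-1 such that the i-th k-mer in Text is equal to Pattern_i (for 1 ≤ i ≤ n).
--
--     text = path[0]
--     for i in range(1,len(path)):
--         if path[i-1][1:] == path[i][:-1]:
--             text += path[i][-1]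
--         else:
--             return ""
--     return text
-- ===== SOURCE B (Python) =====
-- def pathToGenome(path):
--     k = len(path[0])
--     if any(len(p) != k for p in path):
--         return ""
--     genome = ''.join(p[:1] for p in path[:-1]) + path[-1]
--     if all(genome[i:i+k] == p for i, p in enumerate(path)):
--         return genome
--     return ""
-- ===== Notes on version B (the rewrite author's own statement) =====
-- stated objective: alternative
-- what changed: A walks the path once comparing each consecutive k-mer overlap and appending last characters; B never compares consecutive k-mers: it checks all k-mers share one length, builds a candidate genome from the first character of each k-mer plus the final k-mer, and verifies every k-mer occurs at its position in that candidate by slicing.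
-- intended difference: On paths whose first k-mer is empty and all later k-mers are single characters, A returns the later k-mers concatenated although the k-mers have no common length k (the output is not a genome spelled by equal-length patterns), while B returns "", the intended answer for an invalid path. — e.g. on pathToGenome(["", "A"]): A returns "A", B returns ""
import Mathlib
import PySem

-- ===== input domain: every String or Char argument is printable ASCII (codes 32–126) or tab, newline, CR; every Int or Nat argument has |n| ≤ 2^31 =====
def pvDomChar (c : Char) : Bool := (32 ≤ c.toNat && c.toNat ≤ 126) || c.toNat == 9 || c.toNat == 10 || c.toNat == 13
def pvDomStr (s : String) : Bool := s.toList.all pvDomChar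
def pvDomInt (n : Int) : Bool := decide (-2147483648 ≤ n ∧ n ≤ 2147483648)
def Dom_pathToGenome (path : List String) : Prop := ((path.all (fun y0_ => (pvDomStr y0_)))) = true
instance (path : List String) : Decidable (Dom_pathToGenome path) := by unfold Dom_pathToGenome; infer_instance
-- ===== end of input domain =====

-- B replaces A's pairwise-overlap loop by a global reconstruction check: build a candidate genome
-- from the FIRST character of each k-mer plus the final k-mer and verify every k-mer occurs at its
-- position in it (same cost, different algorithm); on the degenerate inputs of D_ below B rejects
-- where A accidentally accepts.

-- ===== PORT A =====
-- A's loop 'for i in range(1,len(path))' carrying (path[i-1], remaining k-mers, text so far).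
-- prev[1:] is prev.tail, cur[:-1] is cur.dropLast (Python slices clamp, these are exact);
-- cur[-1] is cur.getLastD ' ' — exact under Pre_, which guarantees cur ≠ [] when it is reached.
def pathToGenomeLoopA (prev : List Char) (rest : List (List Char)) (text : List Char) : List Char :=
  match rest with
  | [] => text
  | cur :: rest' =>
    if prev.tail = cur.dropLast then
      pathToGenomeLoopA cur rest' (text ++ [cur.getLastD ' '])
    else []

def pathToGenome (path : List String) : String :=
  match path.map String.toList with
  | [] => ""  -- unreachable: Python's path[0] raises IndexError; Pre_ excludes the empty path
  | p0 :: rest => String.ofList (pathToGenomeLoopA p0 rest p0)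

-- ===== PORT B =====
-- Source B: k = len(path[0]); uniform-length check; genome = firsts of path[:-1] + path[-1];
-- genome[i:i+k] has nonnegative bounds, so the Python slice is exactly (genome.drop i).take k.
def pathToGenome_alt (path : List String) : String :=
  match path.map String.toList with
  | [] => ""  -- unreachable: Python's path[0] raises IndexError; Pre_ excludes the empty path
  | p0 :: rest =>
    let k := p0.length
    if (p0 :: rest).any (fun p => p.length ≠ k) then ""
    else
      let genome := (((p0 :: rest).dropLast.map (fun p => p.take 1)).flatten) ++ (p0 :: rest).getLastD []
      if (p0 :: rest).zipIdx.all (fun pi => (genome.drop pi.2).take k == pi.1) then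
        String.ofList genome
      else ""

-- ===== PRECONDITION & SPEC =====
-- Pre_ excludes exactly the inputs where A raises IndexError: the empty path (path[0]), and paths
-- reaching an empty k-mer at position ≥ 1 with every earlier overlap matching (path[i][-1] on "").
def Pre_pathToGenome (path : List String) : Prop :=
  path ≠ [] ∧ ∀ i < path.length - 1, (path.getD (i+1) "").toList = [] →
    ∃ j ≤ i, (path.getD j "").toList.tail ≠ (path.getD (j+1) "").toList.dropLast
instance (path : List String) : Decidable (Pre_pathToGenome path) := by
  unfold Pre_pathToGenome; infer_instance

def pvWitness_pathToGenome : List String := ["AB", "BC"]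

-- On paths whose first k-mer is empty and all later k-mers have length 1, A returns the later
-- k-mers concatenated although the k-mers do not have a common length k (no genome has each
-- pattern as its i-th k-mer), while B returns "" — the intended answer for an invalid path.
def D_pathToGenome (path : List String) : Prop :=
  2 ≤ path.length ∧ (path.headD "").toList = [] ∧ ∀ s ∈ path.tail, s.toList.length = 1
instance (path : List String) : Decidable (D_pathToGenome path) := by
  unfold D_pathToGenome; infer_instance

def Spec_pathToGenome (path : List String) (out : String) : Prop :=
  ¬ D_pathToGenome path → out = pathToGenome_alt path
instance (path : List String) (out : String) : Decidable (Spec_pathToGenome path out) := by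
  unfold Spec_pathToGenome; infer_instance

def pvDiffWitness_pathToGenome : List String := ["", "A"]
def pvDiffWitnessOut_pathToGenome : String × String := ("A", "")

-- ===== CLAIM (what is proved, stated in full; the proofs are below) =====
def Claim_unchanged_pathToGenome : Prop := ∀ (path : List String), Dom_pathToGenome path → Pre_pathToGenome path → Spec_pathToGenome path (pathToGenome path)
def Claim_changed_pathToGenome : Prop := Dom_pathToGenome (pvDiffWitness_pathToGenome) ∧ Pre_pathToGenome (pvDiffWitness_pathToGenome) ∧ D_pathToGenome (pvDiffWitness_pathToGenome) ∧ pathToGenome (pvDiffWitness_pathToGenome) = pvDiffWitnessOut_pathToGenome.1 ∧ pathToGenome_alt (pvDiffWitness_pathToGenome) = pvDiffWitnessOut_pathToGenome.2 ∧ pvDiffWitnessOut_pathToGenome.1 ≠ pvDiffWitnessOut_pathToGenome.2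
def Claim_exact_pathToGenome : Prop := ∀ (path : List String), Dom_pathToGenome path → Pre_pathToGenome path → D_pathToGenome path → pathToGenome path ≠ pathToGenome_alt path

-- ===== LEMMAS AND PROOFS =====

-- shorthand used only by the proofs
def pvOv (ps : List (List Char)) : Bool :=
  (ps.zip ps.tail).all (fun ab => ab.1.tail = ab.2.dropLast)

def pvGnm (ps : List (List Char)) : List Char :=
  ((ps.dropLast.map (fun p => p.take 1)).flatten) ++ ps.getLastD []

def pvSlices (g : List Char) (k : Nat) : List (List Char) → Bool
  | [] => true
  | p :: ps => ((g.take k == p) && pvSlices (g.drop 1) k ps)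

-- A's early-exit loop equals: validate the whole chain, then append all last characters.
theorem pathToGenomeLoopA_eq (rest : List (List Char)) :
    ∀ (prev : List Char) (acc : List Char),
      pathToGenomeLoopA prev rest acc =
        if pvOv (prev :: rest) then acc ++ rest.map (fun p => p.getLastD ' ') else [] := by
  induction rest with
  | nil => intro prev acc; simp [pathToGenomeLoopA, pvOv]
  | cons cur rest' ih =>
    intro prev acc
    simp only [pathToGenomeLoopA, pvOv, List.tail_cons, List.zip_cons_cons, List.all_cons,
      List.map_cons]
    by_cases h : prev.tail = cur.dropLast
    · rw [if_pos h, ih cur (acc ++ [cur.getLastD ' '])]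
      simp only [pvOv, List.tail_cons]
      rw [show decide (prev.tail = cur.dropLast) = true from by simp [h], Bool.true_and,
        List.append_assoc, List.singleton_append]
      rfl
    · simp [h]

theorem pvOv_iff_idx (ps : List (List Char)) :
    pvOv ps = true ↔ ∀ j, j + 1 < ps.length → (ps.getD j []).tail = (ps.getD (j+1) []).dropLast := by
  induction ps with
  | nil => simp [pvOv]
  | cons a t ih =>
    cases t with
    | nil => simp [pvOv]
    | cons b t' =>
      simp only [pvOv, List.tail_cons, List.zip_cons_cons, List.all_cons, Bool.and_eq_true,
        decide_eq_true_eq] at *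
      constructor
      · rintro ⟨h0, hrest⟩ j hj
        cases j with
        | zero => simpa using h0
        | succ j' =>
          have := (ih.1 hrest) j' (by simpa [Nat.succ_lt_succ_iff] using hj)
          simpa using this
      · intro h
        refine ⟨by simpa using h 0 (by simp), ih.2 ?_⟩
        intro j hj
        have := h (j+1) (by simpa [Nat.succ_lt_succ_iff] using hj)
        simpa using this

theorem pvOv_lengths (rest : List (List Char)) : ∀ (p0 : List Char),
    pvOv (p0 :: rest) = true → (∀ p ∈ rest, p ≠ []) →
    ∀ p ∈ rest, p.length = max p0.length 1 := by
  induction rest with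
  | nil => intro p0 _ _ p hp; simp at hp
  | cons p1 rest' ih =>
    intro p0 hov hne p hp
    simp only [pvOv, List.tail_cons, List.zip_cons_cons, List.all_cons, Bool.and_eq_true,
      decide_eq_true_eq] at hov
    obtain ⟨h0, hrest⟩ := hov
    have hlen : p1.length - 1 = p0.length - 1 := by
      have := congrArg List.length h0
      simpa [List.length_tail, List.length_dropLast] using this.symm
    have hp1ne : p1 ≠ [] := hne p1 (by simp)
    have hp1pos : 1 ≤ p1.length := List.length_pos_iff.mpr hp1ne
    have hp1 : p1.length = max p0.length 1 := by omega
    rcases List.mem_cons.mp hp with hp | hp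
    · rw [hp]; exact hp1
    · have := ih p1 (by simpa [pvOv] using hrest) (fun q hq => hne q (by simp [hq])) p hp
      omega

theorem pvDropLast_getLastD (l : List Char) (h : l ≠ []) (d : Char) :
    l.dropLast ++ [l.getLastD d] = l := by
  induction l with
  | nil => simp at h
  | cons x t ih =>
    cases t with
    | nil => simp
    | cons y t' => simpa using ih (by simp)

theorem pvGnm_cons₂ (p0 p1 : List Char) (rest : List (List Char)) :
    pvGnm (p0 :: p1 :: rest) = p0.take 1 ++ pvGnm (p1 :: rest) := by
  simp [pvGnm, List.dropLast_cons₂]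

theorem pvGnm_of_ov (rest : List (List Char)) : ∀ (p0 : List Char),
    1 ≤ p0.length → (∀ p ∈ rest, p.length = p0.length) → pvOv (p0 :: rest) = true →
    pvGnm (p0 :: rest) = p0 ++ rest.map (fun p => p.getLastD ' ') := by
  induction rest with
  | nil => intro p0 _ _ _; simp [pvGnm]
  | cons p1 rest' ih =>
    intro p0 hk hU hov
    simp only [pvOv, List.tail_cons, List.zip_cons_cons, List.all_cons, Bool.and_eq_true,
      decide_eq_true_eq] at hov
    obtain ⟨h0, hrest⟩ := hov
    have hp1k : p1.length = p0.length := hU p1 (by simp)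
    have hih := ih p1 (by omega) (fun q hq => by rw [hU q (by simp [hq]), hp1k])
      (by simpa [pvOv] using hrest)
    rw [pvGnm_cons₂, hih]
    have hp1ne : p1 ≠ [] := by intro h; rw [h] at hp1k; simp at hp1k; omega
    have hsplit : p0 = p0.take 1 ++ p0.tail := by
      rw [← List.drop_one, List.take_append_drop]
    calc p0.take 1 ++ (p1 ++ List.map (fun p => p.getLastD ' ') rest')
        = p0.take 1 ++ ((p1.dropLast ++ [p1.getLastD ' ']) ++ List.map (fun p => p.getLastD ' ') rest') := by
          rw [pvDropLast_getLastD p1 hp1ne]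
      _ = (p0.take 1 ++ p0.tail) ++ (p1.getLastD ' ' :: List.map (fun p => p.getLastD ' ') rest') := by
          rw [h0]; simp
      _ = p0 ++ (p1.getLastD ' ' :: List.map (fun p => p.getLastD ' ') rest') := by rw [← hsplit]

theorem pvSlices_cons (g : List Char) (k : Nat) (p : List Char) (ps : List (List Char)) :
    pvSlices g k (p :: ps) = ((g.take k == p) && pvSlices (g.drop 1) k ps) := rfl

theorem pvSlices_of_ov (rest : List (List Char)) : ∀ (p0 : List Char),
    1 ≤ p0.length → (∀ p ∈ rest, p.length = p0.length) → pvOv (p0 :: rest) = true →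
    pvSlices (pvGnm (p0 :: rest)) p0.length (p0 :: rest) = true := by
  induction rest with
  | nil =>
    intro p0 _ _ _
    simp [pvSlices, pvGnm, List.take_of_length_le]
  | cons p1 rest' ih =>
    intro p0 hk hU hov
    have hov' := hov
    simp only [pvOv, List.tail_cons, List.zip_cons_cons, List.all_cons, Bool.and_eq_true,
      decide_eq_true_eq] at hov'
    obtain ⟨h0, hrestb⟩ := hov'
    have hrestb' : pvOv (p1 :: rest') = true := by simpa [pvOv] using hrestb
    have hp1k : p1.length = p0.length := hU p1 (by simp)
    have hU' : ∀ q ∈ rest', q.length = p1.length := fun q hq => by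
      rw [hU q (by simp [hq]), hp1k]
    obtain ⟨a, p0', rfl⟩ : ∃ a p0', p0 = a :: p0' := by
      cases p0 with
      | nil => simp at hk
      | cons a p0' => exact ⟨a, p0', rfl⟩
    have hp1k' : p1.length = p0'.length + 1 := by simpa using hp1k
    have hih := ih p1 (by omega) hU' hrestb'
    have hgn : pvGnm ((a :: p0') :: p1 :: rest') = a :: pvGnm (p1 :: rest') := by
      rw [pvGnm_cons₂]; rfl
    rw [hgn, pvSlices_cons]
    have h0' : p0' = p1.dropLast := by simpa using h0
    have htail : (pvGnm (p1 :: rest')).take p0'.length = p0' := by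
      have hg : pvGnm (p1 :: rest') = p1 ++ List.map (fun p => p.getLastD ' ') rest' :=
        pvGnm_of_ov rest' p1 (by omega) hU' hrestb'
      have h1 : p1.take p0'.length = p1.dropLast := by
        rw [List.dropLast_eq_take]; congr 1; omega
      rw [hg, List.take_append_of_le_length (by omega), h1, ← h0']
    have hdrop1 : (a :: pvGnm (p1 :: rest')).drop 1 = pvGnm (p1 :: rest') := rfl
    rw [hdrop1, Bool.and_eq_true]
    refine ⟨?_, ?_⟩
    · have h2 : (a :: pvGnm (p1 :: rest')).take (a :: p0').length = a :: p0' := by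
        simp [List.length_cons, List.take_succ_cons, htail]
      simp [htail]
    · rw [hp1k'] at hih
      simpa [List.length_cons] using hih

theorem pvOv_of_slices (rest : List (List Char)) : ∀ (p0 : List Char),
    1 ≤ p0.length → (∀ p ∈ rest, p.length = p0.length) →
    pvSlices (pvGnm (p0 :: rest)) p0.length (p0 :: rest) = true → pvOv (p0 :: rest) = true := by
  induction rest with
  | nil => intro p0 _ _ _; simp [pvOv]
  | cons p1 rest' ih =>
    intro p0 hk hU hsl
    have hp1k : p1.length = p0.length := hU p1 (by simp)
    have hU' : ∀ q ∈ rest', q.length = p1.length := fun q hq => by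
      rw [hU q (by simp [hq]), hp1k]
    obtain ⟨a, p0', rfl⟩ : ∃ a p0', p0 = a :: p0' := by
      cases p0 with
      | nil => simp at hk
      | cons a p0' => exact ⟨a, p0', rfl⟩
    have hp1k' : p1.length = p0'.length + 1 := by simpa using hp1k
    have hgn : pvGnm ((a :: p0') :: p1 :: rest') = a :: pvGnm (p1 :: rest') := by
      rw [pvGnm_cons₂]; rfl
    rw [hgn, pvSlices_cons] at hsl
    have hdrop1 : (a :: pvGnm (p1 :: rest')).drop 1 = pvGnm (p1 :: rest') := rfl
    rw [hdrop1, Bool.and_eq_true] at hsl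
    obtain ⟨hhead, hrest⟩ := hsl
    have hih : pvOv (p1 :: rest') = true := by
      apply ih p1 (by omega) hU'
      rw [hp1k']
      simpa [List.length_cons] using hrest
    have hheadeq : (a :: pvGnm (p1 :: rest')).take (a :: p0').length = a :: p0' :=
      eq_of_beq hhead
    have htaileq : (pvGnm (p1 :: rest')).take p0'.length = p0' := by
      have h2 : a :: (pvGnm (p1 :: rest')).take p0'.length = a :: p0' := by
        simpa [List.length_cons, List.take_succ_cons] using hheadeq
      exact (List.cons.injEq _ _ _ _ ▸ h2).2
    have hfirst : (pvGnm (p1 :: rest')).take (a :: p0').length = p1 := by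
      rw [pvSlices_cons, Bool.and_eq_true] at hrest
      exact eq_of_beq hrest.1
    have hdl : p1.dropLast = p0' := by
      rw [List.dropLast_eq_take]
      have h2 : p1.length - 1 = p0'.length := by omega
      rw [h2, ← hfirst, List.take_take]
      have h3 : min p0'.length (a :: p0').length = p0'.length := by
        simp
      rw [h3, htaileq]
    simp only [pvOv, List.tail_cons, List.zip_cons_cons, List.all_cons, Bool.and_eq_true,
      decide_eq_true_eq]
    exact ⟨by simp [hdl], by simpa [pvOv] using hih⟩

theorem pvOv_short (rest : List (List Char)) : ∀ (a : List Char),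
    a.length ≤ 1 → (∀ p ∈ rest, p.length = 1) → pvOv (a :: rest) = true := by
  induction rest with
  | nil => intro a _ _; simp [pvOv]
  | cons p1 rest' ih =>
    intro a ha hU
    have hp1 : p1.length = 1 := hU p1 (by simp)
    obtain ⟨c, rfl⟩ : ∃ c, p1 = [c] := by
      cases p1 with
      | nil => simp at hp1
      | cons c t => cases t with
        | nil => exact ⟨c, rfl⟩
        | cons d t' => simp at hp1
    have hatail : a.tail = [] := by
      cases a with
      | nil => rfl
      | cons x t => cases t with
        | nil => rfl
        | cons y t' => simp at ha
    have := ih [c] (by simp) (fun q hq => hU q (by simp [hq]))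
    simp only [pvOv, List.tail_cons, List.zip_cons_cons, List.all_cons, Bool.and_eq_true,
      decide_eq_true_eq]
    exact ⟨by simp [hatail], by simpa [pvOv] using this⟩

theorem pvZipIdx_slices (k : Nat) (ps : List (List Char)) : ∀ (g : List Char) (i : Nat),
    ((ps.zipIdx i).all (fun pi => (g.drop pi.2).take k == pi.1)) = pvSlices (g.drop i) k ps := by
  induction ps with
  | nil => intro g i; simp [pvSlices]
  | cons p ps' ih =>
    intro g i
    rw [List.zipIdx_cons, List.all_cons, ih g (i+1)]
    have h1 : (g.drop i).drop 1 = g.drop (i+1) := by rw [List.drop_drop]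
    simp only [pvSlices, h1]

theorem pvGetD_map_toList (path : List String) (i : Nat) :
    (path.map String.toList).getD i [] = (path.getD i "").toList := by
  induction path generalizing i with
  | nil => simp
  | cons s t ih =>
    cases i with
    | zero => simp
    | succ i' => simpa using ih i'

theorem pathToGenome_cons (path : List String) (p0 : List Char) (rest : List (List Char))
    (hm : path.map String.toList = p0 :: rest) :
    pathToGenome path =
      if pvOv (p0 :: rest) then
        String.ofList (p0 ++ rest.map (fun p => p.getLastD ' '))
      else "" := by
  unfold pathToGenome
  rw [hm]
  show String.ofList (pathToGenomeLoopA p0 rest p0) = _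
  rw [pathToGenomeLoopA_eq]
  by_cases h : pvOv (p0 :: rest) = true
  · rw [if_pos h, if_pos h]
  · rw [if_neg h, if_neg h]

theorem pathToGenome_alt_cons (path : List String) (p0 : List Char) (rest : List (List Char))
    (hm : path.map String.toList = p0 :: rest) :
    pathToGenome_alt path =
      if (p0 :: rest).any (fun p => p.length ≠ p0.length) then ""
      else if pvSlices (pvGnm (p0 :: rest)) p0.length (p0 :: rest) then
        String.ofList (pvGnm (p0 :: rest))
      else "" := by
  unfold pathToGenome_alt
  rw [hm]
  have hz : ((p0 :: rest).zipIdx.all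
      (fun pi => ((pvGnm (p0 :: rest)).drop pi.2).take p0.length == pi.1)) =
      pvSlices (pvGnm (p0 :: rest)) p0.length (p0 :: rest) := by
    have := pvZipIdx_slices p0.length (p0 :: rest) (pvGnm (p0 :: rest)) 0
    simpa using this
  show (if ((p0 :: rest).any fun p => decide (p.length ≠ p0.length)) = true then ""
    else if ((p0 :: rest).zipIdx.all
        (fun pi => ((pvGnm (p0 :: rest)).drop pi.2).take p0.length == pi.1)) = true then
      String.ofList (pvGnm (p0 :: rest))
    else "") = _
  rw [hz]

-- ===== VERDICT (by name: the statement is the Claim_ definition above) =====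
theorem pathToGenome_spec : Claim_unchanged_pathToGenome := by
  intro path _ hPre
  unfold Spec_pathToGenome
  intro hND
  obtain ⟨hne, hPreIdx⟩ := hPre
  cases hm : path.map String.toList with
  | nil =>
    unfold pathToGenome pathToGenome_alt
    rw [hm]
  | cons p0 rest =>
    have hlen : path.length = rest.length + 1 := by
      have := congrArg List.length hm
      simpa using this
    have hgetD : ∀ i, (p0 :: rest).getD i [] = (path.getD i "").toList := by
      intro i; rw [← hm, pvGetD_map_toList]
    have hPre' : ∀ i < rest.length, rest.getD i [] = [] →
        ∃ j ≤ i, ((p0 :: rest).getD j []).tail ≠ ((p0 :: rest).getD (j+1) []).dropLast := by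
      intro i hi hnil
      obtain ⟨j, hj, hne'⟩ := hPreIdx i (by omega)
        (by rw [← hgetD (i+1)]; simpa using hnil)
      exact ⟨j, hj, by rw [hgetD j, hgetD (j+1)]; exact hne'⟩
    have hNonNil : pvOv (p0 :: rest) = true → ∀ p ∈ rest, p ≠ [] := by
      intro hov p hp hpnil
      obtain ⟨i, hi, hgi⟩ := List.getElem_of_mem hp
      obtain ⟨j, hj, hnej⟩ := hPre' i hi (by rw [List.getD_eq_getElem _ _ hi, hgi, hpnil])
      exact hnej ((pvOv_iff_idx (p0 :: rest)).1 hov j (by simp only [List.length_cons]; omega))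
    rw [pathToGenome_cons path p0 rest hm, pathToGenome_alt_cons path p0 rest hm]
    by_cases hU : ∀ p ∈ rest, p.length = p0.length
    · -- uniform k-mer lengths
      have hanyf : ((p0 :: rest).any fun p => decide (p.length ≠ p0.length)) = false := by
        simp only [List.any_eq_false]
        intro q hq
        rcases List.mem_cons.mp hq with h | h
        · simp [h]
        · simp [hU q h]
      have hcondA : ¬(((p0 :: rest).any fun p => decide (p.length ≠ p0.length)) = true) := by
        intro hx
        rw [hx] at hanyf
        exact absurd hanyf (by decide)
      rw [if_neg hcondA]
      cases rest with
      | nil =>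
        have hsl : pvSlices (pvGnm [p0]) p0.length [p0] = true := by
          simp [pvSlices, pvGnm, List.take_of_length_le]
        have hov1 : pvOv [p0] = true := by simp [pvOv]
        rw [if_pos hsl, if_pos hov1]
        simp [pvGnm]
      | cons p1 rest' =>
        have hk : 1 ≤ p0.length := by
          by_contra hk0
          have hp10 : p1.length = 0 := by
            have := hU p1 (by simp); omega
          have hp1nil : p1 = [] := List.length_eq_zero_iff.mp hp10
          obtain ⟨j, hj, hnej⟩ := hPre' 0 (by simp) (by simp [hp1nil])
          have hj0 : j = 0 := Nat.le_zero.mp hj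
          subst hj0
          apply hnej
          have hp00 : p0 = [] := by
            cases p0 with
            | nil => rfl
            | cons c t => simp at hk0
          simp [hp00, hp1nil]
        by_cases hov : pvOv (p0 :: p1 :: rest') = true
        · rw [if_pos hov, if_pos (pvSlices_of_ov _ p0 hk hU hov),
            pvGnm_of_ov _ p0 hk hU hov]
        · rw [if_neg hov, if_neg (by
            intro hsl
            exact hov (pvOv_of_slices _ p0 hk hU hsl))]
    · -- non-uniform lengths: B rejects; under Pre_ and ¬D_ A rejects too
      rw [not_forall] at hU
      obtain ⟨p, hU2⟩ := hU
      rw [Classical.not_imp] at hU2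
      obtain ⟨hp, hpne⟩ := hU2
      have hcondT : ((p0 :: rest).any fun p => decide (p.length ≠ p0.length)) = true := by
        simp only [List.any_eq_true]
        exact ⟨p, by simp [hp], by simpa using hpne⟩
      rw [if_pos hcondT]
      by_cases hov : pvOv (p0 :: rest) = true
      · exfalso
        apply hND
        have hnn := hNonNil hov
        have hlens := pvOv_lengths rest p0 hov hnn
        have hk0 : p0.length = 0 := by
          have := hlens p hp; omega
        have h2 : 2 ≤ path.length := by
          have : 1 ≤ rest.length := List.length_pos_iff.mpr (List.ne_nil_of_mem hp)
          omega
        obtain ⟨s, t, rfl⟩ : ∃ s t, path = s :: t := by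
          cases path with
          | nil => exact absurd rfl hne
          | cons s t => exact ⟨s, t, rfl⟩
        have hmh : s.toList = p0 ∧ t.map String.toList = rest := by
          simpa using hm
        refine ⟨h2, ?_, ?_⟩
        · show ((s :: t).headD "").toList = []
          simp only [List.headD_cons]
          rw [hmh.1]
          exact List.length_eq_zero_iff.mp hk0
        · intro s' hs'
          have hmem : s'.toList ∈ rest := by
            rw [← hmh.2]
            exact List.mem_map_of_mem (by simpa using hs')
          have := hlens s'.toList hmem
          simpa [hk0] using this
      · rw [if_neg hov]

theorem pathToGenome_changed : Claim_changed_pathToGenome := by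
  unfold Claim_changed_pathToGenome; decide

theorem pathToGenome_tight : Claim_exact_pathToGenome := by
  intro path _ _ hD
  obtain ⟨h2, hhead, htail⟩ := hD
  obtain ⟨s, t, rfl⟩ : ∃ s t, path = s :: t := by
    cases path with
    | nil => simp at h2
    | cons s t => exact ⟨s, t, rfl⟩
  have hm : (s :: t).map String.toList = s.toList :: t.map String.toList := rfl
  rw [pathToGenome_cons _ _ _ hm, pathToGenome_alt_cons _ _ _ hm]
  have hheads : s.toList = [] := by simpa using hhead
  have htl : ∀ p ∈ t.map String.toList, p.length = 1 := by
    intro p hp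
    obtain ⟨s', hs', rfl⟩ := List.mem_map.mp hp
    exact htail s' (by simpa using hs')
  have hov : pvOv (s.toList :: t.map String.toList) = true :=
    pvOv_short _ _ (by simp [hheads]) htl
  rw [if_pos hov]
  obtain ⟨s1, t1, rfl⟩ : ∃ s1 t1, t = s1 :: t1 := by
    cases t with
    | nil => simp at h2
    | cons s1 t1 => exact ⟨s1, t1, rfl⟩
  have hany : ((s.toList :: (s1 :: t1).map String.toList).any
      fun p => decide (p.length ≠ s.toList.length)) = true := by
    simp only [List.any_eq_true]
    refine ⟨s1.toList, by simp, ?_⟩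
    have h1 : s1.toList.length = 1 := htl s1.toList (by simp)
    simp [h1, hheads]
  rw [if_pos hany]
  intro hcon
  have := congrArg String.toList hcon
  simp [hheads] at this
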